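-- pv_equiv track=rewrite | github.com/bogdanmagometa/abs | tuned_abs/data/features.py | _build_target_to_template_mapping
-- ===== SOURCE A (Python) =====
-- def _build_target_to_template_mapping(query_seq: str, hit_seq: str,
--                                       query_seq_full: str, hit_seq_full: str):
--     """Return a dictionary mapping residues indices within a target AA sequence
--     to respective residues indices whithin full chain of template hit.
--     Args:
--         query_seq: str
--             AA sequence with possibly gap characters
--         hit_seq: str
--             AA sequence with possibly gap characters, same length as query_seq
--         query_seq_full: str
--             AA sequence of the target
--         hit_seq_full: str
--             AA sequence from PDB or mmCIF file
--
--     query_seq and hit_seq should be aligned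
--     """
--
--     if len(query_seq) != len(hit_seq):
--         raise ValueError("Expected query_seq nad hit_seq to be of the same "
--                          "length.")
--
--     mapping = {}
--
--     i, j = 0, 0
--     for q, h in zip(query_seq, hit_seq):
--         if q != '-' and h != '-':
--             mapping[i] = j
--
--         if q != '-':
--             i += 1
--
--         if h != '-':
--             j += 1
--
--     def find_offset(seq, seq_full):
--         seq_no_gaps = seq.replace('-', '')
--         seq_offset = seq_full.find(seq_no_gaps)
--         return seq_offset
--
--     query_offset = find_offset(query_seq, query_seq_full)
--     hit_offset = find_offset(hit_seq, hit_seq_full)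
--
--     if query_offset == -1 or hit_offset == -1:
--         raise ValueError("query_seq (hit_seq) should be a contigues substring"
--                          "of query_seq_full (hit_seq_full)")
--
--     mapping = {k + query_offset : v + hit_offset for k, v in mapping.items()}
--
--     return mapping
-- ===== SOURCE B (Python) =====
-- def _build_target_to_template_mapping(query_seq: str, hit_seq: str,
--                                       query_seq_full: str, hit_seq_full: str):
--     """Hash-join reimplementation: build the lists of gapless column positions
--     for each sequence, index the hit columns in a dict keyed by column, then
--     join each query residue rank against that index."""
--     if len(query_seq) != len(hit_seq):
--         raise ValueError("Expected query_seq nad hit_seq to be of the same "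
--                          "length.")
--
--     query_offset = query_seq_full.find(query_seq.replace('-', ''))
--     hit_offset = hit_seq_full.find(hit_seq.replace('-', ''))
--
--     if query_offset == -1 or hit_offset == -1:
--         raise ValueError("query_seq (hit_seq) should be a contigues substring"
--                          "of query_seq_full (hit_seq_full)")
--
--     hit_cols = [c for c, ch in enumerate(hit_seq) if ch != '-']
--     query_cols = [c for c, ch in enumerate(query_seq) if ch != '-']
--     hit_col_to_res = {c: j for j, c in enumerate(hit_cols)}
--
--     return {i + query_offset: hit_col_to_res[c] + hit_offset
--             for i, c in enumerate(query_cols)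
--             if c in hit_col_to_res}
-- ===== Notes on version B (the rewrite author's own statement) =====
-- stated objective: alternative
-- what changed: Replaces A's single counter-threaded zipped pass (two running residue counters mutated while inserting) by a hash join: compute each sequence's list of gapless column positions, build a dict indexing hit columns by their residue rank, then join enumerated query ranks against that dict; Pre_ only excludes the inputs where A (and B) raise ValueError.
import Mathlib
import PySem

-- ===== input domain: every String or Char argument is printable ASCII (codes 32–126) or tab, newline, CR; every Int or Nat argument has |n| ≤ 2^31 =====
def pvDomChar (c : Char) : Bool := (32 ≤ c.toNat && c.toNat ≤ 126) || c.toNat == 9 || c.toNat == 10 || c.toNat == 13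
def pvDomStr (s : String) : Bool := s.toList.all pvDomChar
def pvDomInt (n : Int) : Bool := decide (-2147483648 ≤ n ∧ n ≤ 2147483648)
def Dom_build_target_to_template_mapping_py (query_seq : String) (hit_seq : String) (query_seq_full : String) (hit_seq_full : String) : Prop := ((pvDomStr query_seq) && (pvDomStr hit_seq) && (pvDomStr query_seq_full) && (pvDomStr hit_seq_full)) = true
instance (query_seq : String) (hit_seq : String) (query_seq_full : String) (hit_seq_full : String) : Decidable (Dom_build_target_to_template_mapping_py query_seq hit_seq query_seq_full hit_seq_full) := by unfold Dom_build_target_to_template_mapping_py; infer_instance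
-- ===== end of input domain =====

-- B replaces A's counter-threaded zipped pass by a hash join: gapless column
-- position lists, a dict indexing hit columns by residue rank, and a join of
-- enumerated query ranks against it (alternative decomposition, same cost).

-- ===== PORT A =====
-- A's loop body: one step of the counter-threaded pass over a zipped column.
def pvStepA (st : PySem.Dict Int Int × Int × Int) (qh : Char × Char) :
    PySem.Dict Int Int × Int × Int :=
  let d := if qh.1 ≠ '-' ∧ qh.2 ≠ '-' then st.1.insert st.2.1 st.2.2 else st.1
  let i := if qh.1 ≠ '-' then st.2.1 + 1 else st.2.1
  let j := if qh.2 ≠ '-' then st.2.2 + 1 else st.2.2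
  (d, i, j)

def build_target_to_template_mapping_py (query_seq : String) (hit_seq : String) (query_seq_full : String) (hit_seq_full : String) : List (Int × Int) :=
  let st := (query_seq.toList.zip hit_seq.toList).foldl pvStepA (PySem.Dict.empty, 0, 0)
  let query_offset := PySem.Str.find query_seq_full (PySem.Str.replace query_seq "-" "")
  let hit_offset := PySem.Str.find hit_seq_full (PySem.Str.replace hit_seq "-" "")
  -- {k + query_offset : v + hit_offset for k, v in mapping.items()}
  ((st.1.items.foldl
      (fun (d : PySem.Dict Int Int) kv => d.insert (kv.1 + query_offset) (kv.2 + hit_offset))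
      PySem.Dict.empty)).items

-- ===== PORT B =====
-- B helper: [c for c, ch in enumerate(seq) if ch != '-']
def pvGaplessCols (s : List Char) : List Int :=
  ((PySem.List.enumerate s 0).filter (fun p => p.2 ≠ '-')).map (fun p => p.1)

def build_target_to_template_mapping_py_alt (query_seq : String) (hit_seq : String) (query_seq_full : String) (hit_seq_full : String) : List (Int × Int) :=
  let query_offset := PySem.Str.find query_seq_full (PySem.Str.replace query_seq "-" "")
  let hit_offset := PySem.Str.find hit_seq_full (PySem.Str.replace hit_seq "-" "")
  let hit_cols := pvGaplessCols hit_seq.toList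
  let query_cols := pvGaplessCols query_seq.toList
  -- hit_col_to_res = {c: j for j, c in enumerate(hit_cols)}
  let hit_col_to_res := (PySem.List.enumerate hit_cols 0).foldl
      (fun (d : PySem.Dict Int Int) p => d.insert p.2 p.1) PySem.Dict.empty
  -- {i + query_offset: hit_col_to_res[c] + hit_offset for i, c in enumerate(query_cols) if c in hit_col_to_res}
  ((PySem.List.enumerate query_cols 0).foldl
      (fun (d : PySem.Dict Int Int) p =>
        match hit_col_to_res.get? p.2 with
        | some j => d.insert (p.1 + query_offset) (j + hit_offset)
        | none => d)
      PySem.Dict.empty).items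

-- ===== PRECONDITION & SPEC =====
-- Pre_ excludes exactly the inputs where A raises ValueError: unequal alignment
-- lengths, or a de-gapped sequence that is not a substring of its full sequence.
def Pre_build_target_to_template_mapping_py (query_seq : String) (hit_seq : String) (query_seq_full : String) (hit_seq_full : String) : Prop :=
  PySem.Str.len query_seq = PySem.Str.len hit_seq ∧
  PySem.Str.find query_seq_full (PySem.Str.replace query_seq "-" "") ≠ -1 ∧
  PySem.Str.find hit_seq_full (PySem.Str.replace hit_seq "-" "") ≠ -1
instance (query_seq : String) (hit_seq : String) (query_seq_full : String) (hit_seq_full : String) : Decidable (Pre_build_target_to_template_mapping_py query_seq hit_seq query_seq_full hit_seq_full) := by unfold Pre_build_target_to_template_mapping_py; infer_instance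

def pvWitness_build_target_to_template_mapping_py : String × String × String × String :=
  ("A-B", "AB-", "AB", "AB")

def Spec_build_target_to_template_mapping_py (query_seq : String) (hit_seq : String) (query_seq_full : String) (hit_seq_full : String) (out : List (Int × Int)) : Prop := out = build_target_to_template_mapping_py_alt query_seq hit_seq query_seq_full hit_seq_full
instance (query_seq : String) (hit_seq : String) (query_seq_full : String) (hit_seq_full : String) (out : List (Int × Int)) : Decidable (Spec_build_target_to_template_mapping_py query_seq hit_seq query_seq_full hit_seq_full out) := by unfold Spec_build_target_to_template_mapping_py; infer_instance

-- ===== CLAIM (what is proved, stated in full; the proofs are below) =====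
def Claim_equal_build_target_to_template_mapping_py : Prop := ∀ (query_seq : String) (hit_seq : String) (query_seq_full : String) (hit_seq_full : String), Dom_build_target_to_template_mapping_py query_seq hit_seq query_seq_full hit_seq_full → Pre_build_target_to_template_mapping_py query_seq hit_seq query_seq_full hit_seq_full → Spec_build_target_to_template_mapping_py query_seq hit_seq query_seq_full hit_seq_full (build_target_to_template_mapping_py query_seq hit_seq query_seq_full hit_seq_full)

-- ===== LEMMAS AND PROOFS =====

-- increment of a residue counter at one column
def pvDelta (c : Char) : Int := if c ≠ '-' then 1 else 0

-- the mapping both programs compute, as a plain list over the columns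
def pvCore : List Char → List Char → Int → Int → List (Int × Int)
  | q :: qs, h :: hs, i, j =>
    (if q ≠ '-' ∧ h ≠ '-' then [(i, j)] else []) ++ pvCore qs hs (i + pvDelta q) (j + pvDelta h)
  | _, _, _, _ => []

lemma pvCore_fst_le (qs : List Char) : ∀ hs i j, ∀ p ∈ pvCore qs hs i j, i ≤ p.1 := by
  induction qs with
  | nil => intro hs i j p hp; simp [pvCore] at hp
  | cons q qs ih =>
    intro hs i j p hp
    cases hs with
    | nil => simp [pvCore] at hp
    | cons h hs =>
      simp only [pvCore, List.mem_append] at hp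
      rcases hp with hp | hp
      · split at hp <;> simp_all
      · have := ih hs (i + pvDelta q) (j + pvDelta h) p hp
        have : i + 0 ≤ i + pvDelta q := by
          unfold pvDelta; split <;> omega
        omega

lemma pvCore_fst_pairwise (qs : List Char) : ∀ hs i j,
    ((pvCore qs hs i j).map Prod.fst).Pairwise (· < ·) := by
  induction qs with
  | nil => intro hs i j; simp [pvCore]
  | cons q qs ih =>
    intro hs i j
    cases hs with
    | nil => simp [pvCore]
    | cons h hs =>
      simp only [pvCore, List.map_append, List.pairwise_append]
      refine ⟨?_, ?_, ?_⟩
      · split <;> simp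
      · exact ih hs _ _
      · intro a ha b hb
        split at ha
        · rename_i hcond
          simp only [List.map_cons, List.map_nil, List.mem_cons, List.not_mem_nil, or_false] at ha
          simp only [List.mem_map] at hb
          obtain ⟨p, hp, rfl⟩ := hb
          have h1 := pvCore_fst_le qs hs (i + pvDelta q) (j + pvDelta h) p hp
          have h2 : pvDelta q = 1 := by unfold pvDelta; simp [hcond.1]
          omega
        · simp at ha

lemma pvCore_keys_nodup (qs hs : List Char) (i j c : Int) :
    ((pvCore qs hs i j).map (fun p => p.1 + c)).Nodup := by
  have h0 := pvCore_fst_pairwise qs hs i j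
  have h1 : (((pvCore qs hs i j).map Prod.fst).map (fun x => x + c)).Pairwise (· < ·) :=
    List.Pairwise.map _ (by intro a b hab; omega) h0
  have h2 : ((pvCore qs hs i j).map (fun p => p.1 + c)).Pairwise (· < ·) := by
    simpa [List.map_map, Function.comp] using h1
  exact h2.imp (fun h => ne_of_lt h)

-- A's loop: running the counter-threaded pass from a dict whose keys are all
-- below the current counter appends exactly pvCore to the items.
lemma pvA_fold (qs : List Char) : ∀ (hs : List Char) (d : PySem.Dict Int Int) (i j : Int),
    d.keys.Nodup → (∀ k ∈ d.keys, k < i) →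
    ((qs.zip hs).foldl pvStepA (d, i, j)).1.items = d.items ++ pvCore qs hs i j := by
  induction qs with
  | nil => intro hs d i j _ _; simp [pvCore]
  | cons q qs ih =>
    intro hs d i j hnd hlt
    cases hs with
    | nil => simp [pvCore]
    | cons h hs =>
      simp only [List.zip_cons_cons, List.foldl_cons]
      by_cases hcond : q ≠ '-' ∧ h ≠ '-'
      · have hfresh : d.contains i = false := by
          rw [PySem.Dict.contains_eq_decide_mem_keys]
          simp only [decide_eq_false_iff_not]
          intro hmem; exact absurd (hlt i hmem) (lt_irrefl i)
        have hstep : pvStepA (d, i, j) (q, h) = (d.insert i j, i + 1, j + 1) := by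
          simp [pvStepA, hcond]
        rw [hstep, ih hs (d.insert i j) (i + 1) (j + 1)
              (PySem.Dict.nodup_keys_insert _ _ _ hnd)
              (by intro k hk
                  rcases (PySem.Dict.mem_keys_insert _ _ _ _).1 hk with rfl | hk
                  · omega
                  · have := hlt k hk; omega)]
        rw [PySem.Dict.items_insert_of_not_contains _ _ hfresh]
        have hd : pvDelta q = 1 ∧ pvDelta h = 1 := by
          unfold pvDelta; simp [hcond.1, hcond.2]
        simp [pvCore, hcond, hd.1, hd.2, List.append_assoc]
      · have hstep : pvStepA (d, i, j) (q, h) =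
            (d, i + pvDelta q, j + pvDelta h) := by
          unfold pvStepA pvDelta
          by_cases hq : q = '-' <;> by_cases hh : h = '-' <;> simp_all
        rw [hstep, ih hs d (i + pvDelta q) (j + pvDelta h) hnd
              (by intro k hk
                  have := hlt k hk
                  have : (0:Int) ≤ pvDelta q := by unfold pvDelta; split <;> omega
                  omega)]
        simp [pvCore, hcond]

-- B-side abstractions: gapless columns as a direct recursion, and the
-- (rank, column) enumeration of the gapless columns.
def pvColsGo : List Char → Int → List Int
  | [], _ => []
  | q :: qs, c => (if q ≠ '-' then [c] else []) ++ pvColsGo qs (c + 1)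

def pvRC : List Char → Int → Int → List (Int × Int)
  | [], _, _ => []
  | q :: qs, c, i => (if q ≠ '-' then [(i, c)] else []) ++ pvRC qs (c + 1) (i + pvDelta q)

-- lookup of a column in the hit index dict, as a structural function
def pvLookI : List Char → Int → Int → Option Int
  | [], _, _ => none
  | h :: hs, c, j => if c = 0 then (if h ≠ '-' then some j else none) else pvLookI hs (c - 1) (j + pvDelta h)

lemma pvColsGo_eq_enumerate (s : List Char) : ∀ c : Int,
    ((PySem.List.enumerate s c).filter (fun p => p.2 ≠ '-')).map (fun p => p.1) = pvColsGo s c := by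
  induction s with
  | nil => intro c; simp [PySem.List.enumerate_nil, pvColsGo]
  | cons q qs ih =>
    intro c
    rw [PySem.List.enumerate_cons, List.filter_cons]
    by_cases hq : q = '-'
    · rw [if_neg (by simp [hq])]
      rw [ih (c + 1)]
      simp [pvColsGo, hq]
    · rw [if_pos (by simp [hq])]
      rw [List.map_cons, ih (c + 1)]
      simp [pvColsGo, hq]

lemma pvGaplessCols_eq (s : List Char) : pvGaplessCols s = pvColsGo s 0 := by
  unfold pvGaplessCols
  exact pvColsGo_eq_enumerate s 0

lemma pvRC_eq (s : List Char) : ∀ (c i : Int),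
    PySem.List.enumerate (pvColsGo s c) i = pvRC s c i := by
  induction s with
  | nil => intro c i; simp [pvColsGo, pvRC, PySem.List.enumerate_nil]
  | cons q qs ih =>
    intro c i
    by_cases hq : q = '-'
    · simp [pvColsGo, pvRC, hq, pvDelta, ih]
    · simp [pvColsGo, pvRC, hq, pvDelta, PySem.List.enumerate_cons, ih]

lemma pvRC_shift (s : List Char) : ∀ (c i : Int),
    pvRC s (c + 1) i = (pvRC s c i).map (fun p => (p.1, p.2 + 1)) := by
  induction s with
  | nil => intro c i; simp [pvRC]
  | cons q qs ih =>
    intro c i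
    by_cases hq : q = '-' <;> simp [pvRC, hq, ih (c + 1)]

lemma pvRC_snd_ge (s : List Char) : ∀ (c i : Int), ∀ p ∈ pvRC s c i, c ≤ p.2 := by
  induction s with
  | nil => intro c i p hp; simp [pvRC] at hp
  | cons q qs ih =>
    intro c i p hp
    simp only [pvRC, List.mem_append] at hp
    rcases hp with hp | hp
    · split at hp <;> simp_all
    · have := ih (c + 1) (i + pvDelta q) p hp; omega

lemma pvRC_fst_ge (s : List Char) : ∀ (c i : Int), ∀ p ∈ pvRC s c i, i ≤ p.1 := by
  induction s with
  | nil => intro c i p hp; simp [pvRC] at hp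
  | cons q qs ih =>
    intro c i p hp
    simp only [pvRC, List.mem_append] at hp
    rcases hp with hp | hp
    · split at hp <;> simp_all
    · have := ih (c + 1) (i + pvDelta q) p hp
      have : (0:Int) ≤ pvDelta q := by unfold pvDelta; split <;> omega
      omega

lemma pvRC_fst_pairwise (s : List Char) : ∀ (c i : Int),
    ((pvRC s c i).map Prod.fst).Pairwise (· < ·) := by
  induction s with
  | nil => intro c i; simp [pvRC]
  | cons q qs ih =>
    intro c i
    simp only [pvRC, List.map_append, List.pairwise_append]
    refine ⟨?_, ih _ _, ?_⟩
    · split <;> simp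
    · intro a ha b hb
      split at ha
      · rename_i hq
        simp only [List.map_cons, List.map_nil, List.mem_cons, List.not_mem_nil, or_false] at ha
        simp only [List.mem_map] at hb
        obtain ⟨p, hp, rfl⟩ := hb
        have h1 := pvRC_fst_ge qs (c + 1) (i + pvDelta q) p hp
        have h2 : pvDelta q = 1 := by unfold pvDelta; simp [hq]
        omega
      · simp at ha

lemma pvRC_snd_pairwise (s : List Char) : ∀ (c i : Int),
    ((pvRC s c i).map Prod.snd).Pairwise (· < ·) := by
  induction s with
  | nil => intro c i; simp [pvRC]
  | cons q qs ih =>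
    intro c i
    simp only [pvRC, List.map_append, List.pairwise_append]
    refine ⟨?_, ih _ _, ?_⟩
    · split <;> simp
    · intro a ha b hb
      split at ha
      · simp only [List.map_cons, List.map_nil, List.mem_cons, List.not_mem_nil, or_false] at ha
        simp only [List.mem_map] at hb
        obtain ⟨p, hp, rfl⟩ := hb
        have h1 := pvRC_snd_ge qs (c + 1) (i + pvDelta q) p hp
        omega
      · simp at ha

-- lookup in the hit-column dict agrees with the structural lookup
lemma pvLookI_some_mem (hs : List Char) : ∀ (c j v : Int),
    pvLookI hs c j = some v → (v, c) ∈ pvRC hs 0 j := by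
  induction hs with
  | nil => intro c j v h; simp [pvLookI] at h
  | cons h hs ih =>
    intro c j v hv
    by_cases hc : c = 0
    · subst hc
      have hv' : (if h ≠ '-' then some j else none) = some v := by
        simpa [pvLookI] using hv
      by_cases hne : h = '-'
      · simp [hne] at hv'
      · have hjv : j = v := by simpa [hne] using hv'
        subst hjv
        simp [pvRC, hne]
    · have hv' : pvLookI hs (c - 1) (j + pvDelta h) = some v := by
        simpa [pvLookI, hc] using hv
      have hmem := ih (c - 1) (j + pvDelta h) v hv'
      have hmem1 : (v, c) ∈ pvRC hs 1 (j + pvDelta h) := by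
        rw [show (1 : Int) = 0 + 1 by ring, pvRC_shift]
        refine List.mem_map.2 ⟨(v, c - 1), hmem, ?_⟩
        simp
      simp only [pvRC, List.mem_append]
      exact Or.inr hmem1

lemma pvLookI_none_not_mem (hs : List Char) : ∀ (c j : Int),
    pvLookI hs c j = none → ∀ p ∈ pvRC hs 0 j, p.2 ≠ c := by
  induction hs with
  | nil => intro c j _ p hp; simp [pvRC] at hp
  | cons h hs ih =>
    intro c j hv p hp
    simp only [pvRC, List.mem_append] at hp
    by_cases hc : c = 0
    · subst hc
      have hv' : (if h ≠ '-' then some j else none) = none := by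
        simpa [pvLookI] using hv
      rcases hp with hp | hp
      · by_cases hne : h = '-'
        · rw [if_neg (by simp [hne])] at hp
          simp at hp
        · simp [hne] at hv'
      · have := pvRC_snd_ge hs 1 (j + pvDelta h) p hp
        omega
    · have hv' : pvLookI hs (c - 1) (j + pvDelta h) = none := by
        simpa [pvLookI, hc] using hv
      rcases hp with hp | hp
      · have hp2 : p.2 = 0 := by
          split at hp <;> simp_all
        omega
      · have hp' : p ∈ (pvRC hs 0 (j + pvDelta h)).map (fun p => (p.1, p.2 + 1)) := by
          rw [← pvRC_shift]
          simpa using hp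
        obtain ⟨p', hp', heq⟩ := List.mem_map.1 hp'
        have hne := ih (c - 1) (j + pvDelta h) hv' p' hp'
        rw [← heq]
        simp only [ne_eq]
        omega

-- the emit fold over fresh strictly increasing keys appends its filterMap
lemma pvEmit_fold (g : Int → Option Int) (qo ho : Int) (ps : List (Int × Int)) :
    ∀ (d : PySem.Dict Int Int), d.keys.Nodup →
    (∀ k ∈ d.keys, ∀ p ∈ ps, k < p.1 + qo) →
    (ps.map Prod.fst).Pairwise (· < ·) →
    (ps.foldl (fun (d : PySem.Dict Int Int) p =>
        match g p.2 with
        | some j => d.insert (p.1 + qo) (j + ho)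
        | none => d) d).items
      = d.items ++ ps.filterMap (fun p => (g p.2).map (fun j => (p.1 + qo, j + ho))) := by
  induction ps with
  | nil => intro d _ _ _; simp
  | cons p ps ih =>
    intro d hnd hlt hpw
    simp only [List.map_cons, List.pairwise_cons] at hpw
    simp only [List.foldl_cons, List.filterMap_cons]
    cases hg : g p.2 with
    | none =>
      simp only [Option.map_none]
      exact ih d hnd (fun k hk p' hp' => hlt k hk p' (List.mem_cons_of_mem _ hp')) hpw.2
    | some j =>
      have hfresh : d.contains (p.1 + qo) = false := by
        rw [PySem.Dict.contains_eq_decide_mem_keys]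
        simp only [decide_eq_false_iff_not]
        intro hmem
        exact absurd (hlt _ hmem p (List.mem_cons_self)) (lt_irrefl _)
      simp only [Option.map_some]
      rw [ih (d.insert (p.1 + qo) (j + ho))
            (PySem.Dict.nodup_keys_insert _ _ _ hnd)
            (by intro k hk p' hp'
                rcases (PySem.Dict.mem_keys_insert _ _ _ _).1 hk with rfl | hk
                · have := hpw.1 p'.1 (List.mem_map.2 ⟨p', hp', rfl⟩); omega
                · exact hlt k hk p' (List.mem_cons_of_mem _ hp'))
            hpw.2]
      rw [PySem.Dict.items_insert_of_not_contains _ _ hfresh]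
      simp [List.append_assoc]

-- the join of query ranks against the structural hit lookup IS pvCore, shifted
lemma pvJoin_eq_core (qs : List Char) : ∀ (hs : List Char) (i j qo ho : Int),
    (pvRC qs 0 i).filterMap
        (fun p => (pvLookI hs p.2 j).map (fun v => (p.1 + qo, v + ho)))
      = (pvCore qs hs i j).map (fun p => (p.1 + qo, p.2 + ho)) := by
  induction qs with
  | nil => intro hs i j qo ho; simp [pvRC]; cases hs <;> simp [pvCore]
  | cons q qs ih =>
    intro hs i j qo ho
    cases hs with
    | nil =>
      have : ∀ p ∈ pvRC (q :: qs) 0 i,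
          (pvLookI [] p.2 j).map (fun v => (p.1 + qo, v + ho)) = none := by
        intro p _; simp [pvLookI]
      rw [List.filterMap_eq_nil_iff.2 (by intro p hp; simpa using this p hp)]
      simp [pvCore]
    | cons h hs =>
      simp only [pvRC, List.filterMap_append]
      have htail : (pvRC qs (0 + 1) (i + pvDelta q)).filterMap
            (fun p => (pvLookI (h :: hs) p.2 j).map (fun v => (p.1 + qo, v + ho)))
          = (pvCore qs hs (i + pvDelta q) (j + pvDelta h)).map (fun p => (p.1 + qo, p.2 + ho)) := by
        rw [pvRC_shift, List.filterMap_map]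
        rw [List.filterMap_congr (g := fun p =>
              (pvLookI hs p.2 (j + pvDelta h)).map (fun v => (p.1 + qo, v + ho)))
            (by intro p hp
                have hge := pvRC_snd_ge qs 0 (i + pvDelta q) p hp
                have hne : p.2 + 1 ≠ 0 := by omega
                simp only [Function.comp]
                rw [show pvLookI (h :: hs) (p.2 + 1) j
                      = pvLookI hs (p.2 + 1 - 1) (j + pvDelta h) by
                      simp [pvLookI, hne]]
                norm_num)]
        exact ih hs (i + pvDelta q) (j + pvDelta h) qo ho
      rw [htail]
      by_cases hq : q = '-'
      · simp [pvCore, hq]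
      · by_cases hh : h = '-'
        · simp [pvCore, pvLookI, hq, hh]
        · simp [pvCore, pvLookI, hq, hh]

-- the hit-column dict built by B looks up exactly pvLookI
lemma pvHitDict_get (hs : List Char) (c : Int) :
    ((PySem.List.enumerate (pvGaplessCols hs) 0).foldl
        (fun (d : PySem.Dict Int Int) p => d.insert p.2 p.1) PySem.Dict.empty).get? c
      = pvLookI hs c 0 := by
  rw [pvGaplessCols_eq, pvRC_eq]
  have hnodup : ((pvRC hs 0 0).map Prod.snd).Nodup :=
    (pvRC_snd_pairwise hs 0 0).imp (fun h => ne_of_lt h)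
  have hitems : ((pvRC hs 0 0).foldl
        (fun (d : PySem.Dict Int Int) p => d.insert p.2 p.1) PySem.Dict.empty).items
      = (pvRC hs 0 0).map (fun p => (p.2, p.1)) := by
    rw [PySem.Dict.items_foldl_insert_fresh (pvRC hs 0 0) Prod.snd Prod.fst PySem.Dict.empty
          (by intro a _; simp [PySem.Dict.contains_empty]) hnodup]
    rfl
  cases hl : pvLookI hs c 0 with
  | some v =>
    apply PySem.Dict.get?_of_mem_items
    · rw [hitems]
      exact List.mem_map.2 ⟨(v, c), pvLookI_some_mem hs c 0 v hl, rfl⟩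
    · simp only [PySem.Dict.keys, hitems, List.map_map]
      simpa [Function.comp] using hnodup
  | none =>
    rw [PySem.Dict.get?_eq_none_iff_not_mem_keys]
    simp only [PySem.Dict.keys, hitems, List.map_map]
    intro hmem
    obtain ⟨p, hp, hpc⟩ := List.mem_map.1 hmem
    exact pvLookI_none_not_mem hs c 0 hl p hp (by simpa using hpc)

-- ===== VERDICT (by name: the statement is the Claim_ definition above) =====
theorem build_target_to_template_mapping_py_spec : Claim_equal_build_target_to_template_mapping_py := by
  intro qs hs qf hf _ _
  unfold Spec_build_target_to_template_mapping_py
  unfold build_target_to_template_mapping_py build_target_to_template_mapping_py_alt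
  dsimp only
  set qo := PySem.Str.find qf (PySem.Str.replace qs "-" "") with hqo
  set ho := PySem.Str.find hf (PySem.Str.replace hs "-" "") with hho
  -- A side
  have hA : ((qs.toList.zip hs.toList).foldl pvStepA (PySem.Dict.empty, 0, 0)).1.items
      = pvCore qs.toList hs.toList 0 0 := by
    rw [pvA_fold qs.toList hs.toList PySem.Dict.empty 0 0
          (by simp [PySem.Dict.keys_empty])
          (by simp [PySem.Dict.keys_empty])]
    rfl
  -- B side
  have hB : ((PySem.List.enumerate (pvGaplessCols qs.toList) 0).foldl
      (fun (d : PySem.Dict Int Int) p =>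
        match ((PySem.List.enumerate (pvGaplessCols hs.toList) 0).foldl
            (fun (d : PySem.Dict Int Int) p => d.insert p.2 p.1) PySem.Dict.empty).get? p.2 with
        | some j => d.insert (p.1 + qo) (j + ho)
        | none => d)
      PySem.Dict.empty).items
      = (pvCore qs.toList hs.toList 0 0).map (fun p => (p.1 + qo, p.2 + ho)) := by
    rw [pvGaplessCols_eq qs.toList, pvRC_eq]
    rw [pvEmit_fold _ qo ho (pvRC qs.toList 0 0) PySem.Dict.empty
          (by simp [PySem.Dict.keys_empty])
          (by simp [PySem.Dict.keys_empty])
          (pvRC_fst_pairwise qs.toList 0 0)]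
    rw [List.filterMap_congr (g := fun p =>
          (pvLookI hs.toList p.2 0).map (fun v => (p.1 + qo, v + ho)))
        (by intro p _; rw [pvHitDict_get])]
    rw [pvJoin_eq_core qs.toList hs.toList 0 0 qo ho]
    rfl
  rw [hB, hA]
  -- the re-insertion of shifted, strictly increasing keys appends them in order
  rw [PySem.Dict.items_foldl_insert_fresh (pvCore qs.toList hs.toList 0 0)
        (fun kv => kv.1 + qo) (fun kv => kv.2 + ho) PySem.Dict.empty
        (by intro a _; simp [PySem.Dict.contains_empty])
        (pvCore_keys_nodup qs.toList hs.toList 0 0 qo)]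
  rfl
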